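-- pv_equiv track=rewrite | github.com/JaVanGri/OutCyte-2.0 | bin/models/outcyte_sp.py | string_replace
-- ===== SOURCE A (Python) =====
-- def string_replace(text):
--     '''
--     Replace uncommon amino acids
--     '''
--     dic = {
--     'X': 'Q',
--     'Z': 'E',
--     'B': 'N',
--     'U': 'C',
--     'J': 'L',
--     'O': 'K'
--     }
--
--     for i, j in dic.items():
--         text = text.replace(i, j)
--     return text
-- ===== SOURCE B (Python) =====
-- def string_replace(text):
--     '''
--     Replace uncommon amino acids
--     '''
--     dic = {
--     'X': 'Q',
--     'Z': 'E',
--     'B': 'N',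
--     'U': 'C',
--     'J': 'L',
--     'O': 'K'
--     }
--     return ''.join(dic.get(c, c) for c in text)
-- ===== Notes on version B (the rewrite author's own statement) =====
-- stated objective: idiomatic
-- what changed: Replaces six sequential full-string .replace scans with a single left-to-right pass that maps each character through the dict (valid because no replacement letter is itself a key).
import Mathlib
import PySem

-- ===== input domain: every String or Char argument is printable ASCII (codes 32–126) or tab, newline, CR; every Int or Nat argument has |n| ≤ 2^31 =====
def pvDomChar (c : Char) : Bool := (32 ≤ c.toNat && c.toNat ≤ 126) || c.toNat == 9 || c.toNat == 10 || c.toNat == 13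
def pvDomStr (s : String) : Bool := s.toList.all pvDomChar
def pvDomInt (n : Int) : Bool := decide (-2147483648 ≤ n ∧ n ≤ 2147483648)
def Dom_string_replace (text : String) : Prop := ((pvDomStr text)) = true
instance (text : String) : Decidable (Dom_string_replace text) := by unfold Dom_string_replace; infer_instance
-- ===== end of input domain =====

-- B replaces A's six sequential full-string .replace scans by one pass mapping each character
-- through the dict (idiomatic; no replacement letter is itself a key, so the result agrees).

-- ===== PORT A =====
-- the dict literal of A, as an insertion-ordered PySem.Dict
def srDic : PySem.Dict String String :=
  PySem.Dict.ofList [("X", "Q"), ("Z", "E"), ("B", "N"), ("U", "C"), ("J", "L"), ("O", "K")]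

-- for i, j in dic.items(): text = text.replace(i, j)
def string_replace (text : String) : String :=
  (PySem.Dict.items srDic).foldl (fun t ij => PySem.Str.replace t ij.1 ij.2) text

-- ===== PORT B =====
-- ''.join(dic.get(c, c) for c in text)
def string_replace_alt (text : String) : String :=
  PySem.Str.join ""
    (text.toList.map (fun c => PySem.Dict.getD srDic (String.ofList [c]) (String.ofList [c])))

-- ===== PRECONDITION & SPEC =====
def Spec_string_replace (text : String) (out : String) : Prop := out = string_replace_alt text
instance (text : String) (out : String) : Decidable (Spec_string_replace text out) := by unfold Spec_string_replace; infer_instance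

-- ===== CLAIM (what is proved, stated in full; the proofs are below) =====
def Claim_equal_string_replace : Prop := ∀ (text : String), Dom_string_replace text → Spec_string_replace text (string_replace text)

-- ===== LEMMAS AND PROOFS =====

-- the single-character substitution performed by one .replace(i, j) with 1-char arguments
def srSwap (a b c : Char) : Char := if c = a then b else c

theorem sr_go_single (a b : Char) :
    ∀ (l : List Char) (fuel : Nat) (acc : List Char), l.length ≤ fuel →
      PySem.Chars.replace.go [a] [b] fuel l acc = acc.reverse ++ l.map (srSwap a b) := by
  intro l
  induction l with
  | nil =>
    intro fuel acc _
    cases fuel <;> simp [PySem.Chars.replace.go]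
  | cons c t ih =>
    intro fuel acc h
    cases fuel with
    | zero => simp at h
    | succ f =>
      simp only [PySem.Chars.replace.go]
      by_cases hc : c = a
      · subst hc
        simp only [List.isPrefixOf, BEq.rfl, Bool.and_true, if_true,
          List.length_singleton, List.drop_succ_cons, List.drop_zero,
          List.reverse_singleton, List.singleton_append]
        rw [ih f (b :: acc) (by simpa using h)]
        simp [srSwap]
      · have hpre : [a].isPrefixOf (c :: t) = false := by
          simp [List.isPrefixOf]
          exact fun hac => hc hac.symm
        rw [hpre]
        simp only [Bool.false_eq_true, if_false]
        rw [ih f (c :: acc) (by simpa using h)]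
        simp [srSwap, hc]

theorem sr_replace_single (a b : Char) (l : List Char) :
    PySem.Chars.replace l [a] [b] = l.map (srSwap a b) := by
  rw [PySem.Chars.replace]
  simp only [List.isEmpty_cons, Bool.false_eq_true, if_false]
  exact sr_go_single a b l l.length [] le_rfl

theorem sr_ofList_eq_of_ne (c x : Char) (h : c ≠ x) :
    (String.ofList [c] == String.ofList [x]) = false := by
  simp only [beq_eq_false_iff_ne, ne_eq]
  intro he
  exact h (by simpa using congrArg String.toList he)

-- the composed effect of A's six replaces on one character equals B's dict lookup
theorem sr_pointwise (c : Char) :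
    (PySem.Dict.getD srDic (String.ofList [c]) (String.ofList [c])).toList =
      [srSwap 'O' 'K' (srSwap 'J' 'L' (srSwap 'U' 'C' (srSwap 'B' 'N'
        (srSwap 'Z' 'E' (srSwap 'X' 'Q' c)))))] := by
  by_cases h1 : c = 'X'; · subst h1; rfl
  by_cases h2 : c = 'Z'; · subst h2; rfl
  by_cases h3 : c = 'B'; · subst h3; rfl
  by_cases h4 : c = 'U'; · subst h4; rfl
  by_cases h5 : c = 'J'; · subst h5; rfl
  by_cases h6 : c = 'O'; · subst h6; rfl
  have hk : PySem.Dict.getD srDic (String.ofList [c]) (String.ofList [c]) = String.ofList [c] := by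
    simp only [PySem.Dict.getD, PySem.Dict.get?]
    rw [show srDic.items = [("X", "Q"), ("Z", "E"), ("B", "N"), ("U", "C"), ("J", "L"), ("O", "K")] from rfl]
    simp only [List.find?]
    rw [show ("X" : String) = String.ofList ['X'] from rfl,
        show ("Z" : String) = String.ofList ['Z'] from rfl,
        show ("B" : String) = String.ofList ['B'] from rfl,
        show ("U" : String) = String.ofList ['U'] from rfl,
        show ("J" : String) = String.ofList ['J'] from rfl,
        show ("O" : String) = String.ofList ['O'] from rfl]
    rw [sr_ofList_eq_of_ne _ _ (fun h => h1 h.symm), sr_ofList_eq_of_ne _ _ (fun h => h2 h.symm),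
        sr_ofList_eq_of_ne _ _ (fun h => h3 h.symm), sr_ofList_eq_of_ne _ _ (fun h => h4 h.symm),
        sr_ofList_eq_of_ne _ _ (fun h => h5 h.symm), sr_ofList_eq_of_ne _ _ (fun h => h6 h.symm)]
    rfl
  rw [hk]
  simp [srSwap, h1, h2, h3, h4, h5, h6]

-- ===== VERDICT (by name: the statement is the Claim_ definition above) =====
theorem string_replace_spec : Claim_equal_string_replace := by
  intro text _
  unfold Spec_string_replace string_replace string_replace_alt
  apply String.toList_inj.mp
  rw [show (PySem.Dict.items srDic) = [("X", "Q"), ("Z", "E"), ("B", "N"), ("U", "C"), ("J", "L"), ("O", "K")] from rfl]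
  simp only [List.foldl, PySem.Str.toList_replace, PySem.Str.toList_join]
  simp only [show ("X" : String).toList = ['X'] from rfl, show ("Q" : String).toList = ['Q'] from rfl,
      show ("Z" : String).toList = ['Z'] from rfl, show ("E" : String).toList = ['E'] from rfl,
      show ("B" : String).toList = ['B'] from rfl, show ("N" : String).toList = ['N'] from rfl,
      show ("U" : String).toList = ['U'] from rfl, show ("C" : String).toList = ['C'] from rfl,
      show ("J" : String).toList = ['J'] from rfl, show ("L" : String).toList = ['L'] from rfl,
      show ("O" : String).toList = ['O'] from rfl, show ("K" : String).toList = ['K'] from rfl,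
      show ("" : String).toList = [] from rfl, sr_replace_single]
  simp only [List.map_map]
  have hfun : (String.toList ∘ fun c => PySem.Dict.getD srDic (String.ofList [c]) (String.ofList [c])) =
      (fun c => [c]) ∘ (srSwap 'O' 'K' ∘ srSwap 'J' 'L' ∘ srSwap 'U' 'C' ∘ srSwap 'B' 'N' ∘
        srSwap 'Z' 'E' ∘ srSwap 'X' 'Q') := by
    funext c
    simp only [Function.comp_apply]
    exact sr_pointwise c
  rw [hfun]
  conv_rhs => rw [← List.map_map]
  rw [PySem.Chars.join_nil_singletons]
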